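-- pv_equiv track=rewrite | github.com/tclohm/challenges | left_rotate.py | left_rotate_k
-- ===== SOURCE A (Python) =====
-- def left_rotate_k(array: [int], times: int) -> [int]:
-- 	if not array:
-- 		return array
--
-- 	length = len(array)
-- 	rotated = []
--
-- 	for i in range(times, times + length):
-- 		# i % length, give us the correct index
-- 		# index can be determined by the number, times, which
-- 		# represents the number of rotations we want to perform
-- 		# on the given array and then return the result
-- 		rotated.append(array[i % length])
-- 	return rotated
-- ===== SOURCE B (Python) =====
-- def left_rotate_k(array: [int], times: int) -> [int]:
-- 	if not array:
-- 		return array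
-- 	k = times % len(array)
-- 	return array[k:] + array[:k]
-- ===== Notes on version B (the rewrite author's own statement) =====
-- stated objective: simpler
-- what changed: Replaces the per-element loop with a modulo index by two whole-array slices: k = times % len(array), return array[k:] + array[:k].
import Mathlib
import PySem

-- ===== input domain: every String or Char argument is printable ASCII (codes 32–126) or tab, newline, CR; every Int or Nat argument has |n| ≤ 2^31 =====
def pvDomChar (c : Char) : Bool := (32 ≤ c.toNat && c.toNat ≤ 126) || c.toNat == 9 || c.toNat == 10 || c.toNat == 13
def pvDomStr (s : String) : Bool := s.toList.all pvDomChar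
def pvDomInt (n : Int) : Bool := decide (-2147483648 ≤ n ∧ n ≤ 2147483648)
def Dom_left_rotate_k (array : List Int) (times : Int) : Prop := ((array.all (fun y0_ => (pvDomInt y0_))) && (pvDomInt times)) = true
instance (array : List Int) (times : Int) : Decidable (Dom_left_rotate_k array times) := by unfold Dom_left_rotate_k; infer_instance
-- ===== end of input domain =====

-- B replaces A's per-element loop with modulo indexing by two whole-array slices (simpler decomposition, same cost).


-- ===== PORT A =====
-- literal port of A: early return on empty, then a loop over range(times, times+length)
-- appending array[i % length]; the index is always in range, so pyGetD with default 0 is exact.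
def left_rotate_k (array : List Int) (times : Int) : List Int :=
  if array = [] then array
  else
    let length : Int := (array.length : Int)
    (PySem.List.pyRange times (times + length) 1).foldl
      (fun rotated i => rotated ++ [PySem.List.pyGetD array (PySem.Int.mod i length) 0]) []

-- ===== PORT B =====
-- literal port of B: k = times % len(array); array[k:] + array[:k]
def left_rotate_k_alt (array : List Int) (times : Int) : List Int :=
  if array = [] then array
  else
    let k : Int := PySem.Int.mod times (array.length : Int)
    PySem.List.slice array (some k) none ++ PySem.List.slice array none (some k)

-- ===== PRECONDITION & SPEC =====
def Spec_left_rotate_k (array : List Int) (times : Int) (out : List Int) : Prop := out = left_rotate_k_alt array times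
instance (array : List Int) (times : Int) (out : List Int) : Decidable (Spec_left_rotate_k array times out) := by unfold Spec_left_rotate_k; infer_instance

-- ===== CLAIM (what is proved, stated in full; the proofs are below) =====
def Claim_equal_left_rotate_k : Prop := ∀ (array : List Int) (times : Int), Dom_left_rotate_k array times → Spec_left_rotate_k array times (left_rotate_k array times)

-- ===== LEMMAS AND PROOFS =====

-- the rotated map of A's loop equals B's drop/take split
theorem pv_rot_map (array : List Int) (times : Int) (h : array ≠ []) :
    (List.range array.length).map
      (fun (j : Nat) => PySem.List.pyGetD array (PySem.Int.mod (times + (j : Int)) (array.length : Int)) 0)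
    = array.drop (PySem.Int.mod times (array.length : Int)).toNat
      ++ array.take (PySem.Int.mod times (array.length : Int)).toNat := by
  have hn : 0 < (array.length : Int) := by
    have := List.length_pos_iff.mpr h; exact_mod_cast this
  set n : Int := (array.length : Int) with hndef
  have hk0 : 0 ≤ PySem.Int.mod times n := PySem.Int.mod_nonneg times hn
  have hkn : PySem.Int.mod times n < n := PySem.Int.mod_lt times hn
  set k : Nat := (PySem.Int.mod times n).toNat with hkdef
  have hklt : k < array.length := by omega
  have hkcast : ((k : Int)) = PySem.Int.mod times n := by omega
  apply List.ext_getElem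
  · simp; omega
  · intro j hj1 hj2
    have hjlen : j < array.length := by simpa using hj1
    have hidx : PySem.Int.mod (times + (j : Int)) n = (((k + j) % array.length : Nat) : Int) := by
      rw [PySem.Int.mod_eq_emod_of_pos hn] at *
      have h1 : times % n = (k : Int) := by omega
      have : (times + (j : Int)) % n = ((k : Int) + j) % n := by
        conv_lhs => rw [show times + (j : Int) = (k : Int) + j + n * (times / n) by
          have := Int.emod_add_mul_ediv times n; omega]
        exact Int.add_mul_emod_self_left _ _ _
      rw [this, hndef]
      push_cast
      rfl
    have hmodlt : (k + j) % array.length < array.length := Nat.mod_lt _ (by omega)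
    rw [List.getElem_map]
    simp only [List.getElem_range]
    rw [hidx, PySem.List.pyGetD_eq_getElem array 0 (by positivity) (by exact_mod_cast hmodlt)]
    have htoNat : (((k + j) % array.length : Nat) : Int).toNat = (k + j) % array.length := by omega
    rw [List.getElem_append]
    split
    · -- j < (drop k).length, i.e. j < array.length - k
      rename_i hlt
      simp only [List.getElem_drop]
      congr 1
      rw [htoNat]
      have : j < array.length - k := by simpa using hlt
      rw [Nat.mod_eq_of_lt (by omega)]
    · rename_i hge
      simp only [List.getElem_take]
      congr 1
      rw [htoNat]
      have : array.length - k ≤ j := by simpa using hge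
      have : (k + j) % array.length = k + j - array.length := by
        have h2 : k + j - array.length < array.length := by omega
        have h3 : k + j = (k + j - array.length) + 1 * array.length := by omega
        conv_lhs => rw [h3]
        rw [Nat.add_mul_mod_self_right, Nat.mod_eq_of_lt h2]
      simp only [List.length_drop] at *
      rw [this]
      omega

-- ===== VERDICT (by name: the statement is the Claim_ definition above) =====
theorem left_rotate_k_spec : Claim_equal_left_rotate_k := by
  intro array times _
  unfold Spec_left_rotate_k left_rotate_k left_rotate_k_alt
  by_cases h : array = []
  · simp [h]
  · simp only [h]
    simp only [if_false]
    have hn : 0 < (array.length : Int) := by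
      have := List.length_pos_iff.mpr h; exact_mod_cast this
    have hk0 : 0 ≤ PySem.Int.mod times (array.length : Int) := PySem.Int.mod_nonneg times hn
    rw [PySem.List.foldl_append_singleton_eq_map, PySem.List.pyRange_one]
    simp only [List.map_map, List.nil_append,
      PySem.List.slice_from array hk0, PySem.List.slice_to array hk0]
    have := pv_rot_map array times h
    simpa [Function.comp, add_sub_cancel_left] using this
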